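-- pv_equiv track=rewrite | github.com/tampd/wiki-bkns | skills/compile-wiki/scripts/compile.py | _deduplicate_claims
-- ===== SOURCE A (Python) =====
-- def _deduplicate_claims(claims: list[dict]) -> list[dict]:
--     """Remove duplicate claims (same entity_id + attribute).
--
--     Priority: ground_truth > high > medium > low.
--     Within same confidence, keep latest observed_at.
--     """
--     confidence_rank = {"ground_truth": 4, "high": 3, "medium": 2, "low": 1}
--     seen = {}
--     for c in claims:
--         key = (c.get("entity_id", ""), c.get("attribute", ""))
--         if key not in seen:
--             seen[key] = c
--         else:
--             existing = seen[key]
--             existing_rank = confidence_rank.get(existing.get("confidence", "low"), 0)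
--             new_rank = confidence_rank.get(c.get("confidence", "low"), 0)
--
--             # Ground truth always wins
--             if new_rank > existing_rank:
--                 seen[key] = c
--             elif new_rank == existing_rank:
--                 # Same confidence → keep latest
--                 if c.get("observed_at", "") > existing.get("observed_at", ""):
--                     seen[key] = c
--     return list(seen.values())
-- ===== SOURCE B (Python) =====
-- def _deduplicate_claims(claims: list[dict]) -> list[dict]:
--     """Deduplicate by (entity_id, attribute): group all claims per key in one
--     pass, then pick each group's winner with max over (rank, observed_at)."""
--     confidence_rank = {"ground_truth": 4, "high": 3, "medium": 2, "low": 1}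
--     groups = {}
--     for c in claims:
--         key = (c.get("entity_id", ""), c.get("attribute", ""))
--         groups.setdefault(key, []).append(c)
--     result = []
--     for group in groups.values():
--         result.append(max(
--             group,
--             key=lambda c: (confidence_rank.get(c.get("confidence", "low"), 0),
--                            c.get("observed_at", ""))))
--     return result
-- ===== Notes on version B (the rewrite author's own statement) =====
-- stated objective: alternative
-- what changed: A's single pass keeping a running best per (entity_id, attribute) is replaced by a collect-then-reduce shape: one pass groups all claims per key, then each winner is picked with max over the (confidence rank, observed_at) tuple key.
import Mathlib
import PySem

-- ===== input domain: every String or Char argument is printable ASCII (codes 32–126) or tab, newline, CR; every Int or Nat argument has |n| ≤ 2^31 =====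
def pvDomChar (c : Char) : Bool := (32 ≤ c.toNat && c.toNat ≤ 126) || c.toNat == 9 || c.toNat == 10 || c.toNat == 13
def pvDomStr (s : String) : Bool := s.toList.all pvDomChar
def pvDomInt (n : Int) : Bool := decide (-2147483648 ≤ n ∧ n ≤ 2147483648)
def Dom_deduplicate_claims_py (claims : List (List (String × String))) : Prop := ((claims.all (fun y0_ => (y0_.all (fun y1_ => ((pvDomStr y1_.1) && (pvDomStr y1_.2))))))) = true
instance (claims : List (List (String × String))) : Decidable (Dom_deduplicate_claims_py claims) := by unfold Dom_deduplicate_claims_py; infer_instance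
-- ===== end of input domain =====

-- B regroups A's running-best single pass into collect-groups-then-pick-max; objective: simpler decomposition, same result.

-- shared helpers (both Pythons use the same c.get(...) accesses and the same confidence_rank dict)
-- c.get(k, d) on a claim dict
def pvGetS (c : List (String × String)) (k d : String) : String :=
  (PySem.Dict.mk c).getD k d

-- (c.get("entity_id",""), c.get("attribute",""))
def pvKey (c : List (String × String)) : String × String :=
  (pvGetS c "entity_id" "", pvGetS c "attribute" "")

-- confidence_rank.get(s, 0)
def pvRank (s : String) : Int :=
  (PySem.Dict.ofList [("ground_truth", (4 : Int)), ("high", 3), ("medium", 2), ("low", 1)]).getD s 0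

-- ===== PORT A =====
-- the body of A's 'for c in claims' loop over the dict 'seen'
def pvStepA (seen : PySem.Dict (String × String) (List (String × String)))
    (c : List (String × String)) : PySem.Dict (String × String) (List (String × String)) :=
  let key := pvKey c
  if seen.contains key = false then seen.insert key c
  else
    match seen.get? key with
    | none => seen  -- unreachable: key is in seen
    | some existing =>
      let existing_rank := pvRank (pvGetS existing "confidence" "low")
      let new_rank := pvRank (pvGetS c "confidence" "low")
      if new_rank > existing_rank then seen.insert key c
      else if new_rank = existing_rank then
        if pvGetS c "observed_at" "" > pvGetS existing "observed_at" "" then seen.insert key c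
        else seen
      else seen

def deduplicate_claims_py (claims : List (List (String × String))) : List (List (String × String)) :=
  (claims.foldl pvStepA PySem.Dict.empty).values

-- ===== PORT B =====
-- sort keys for max(): confidence rank, then observed_at
def pvK1 (c : List (String × String)) : Int := pvRank (pvGetS c "confidence" "low")
def pvK2 (c : List (String × String)) : String := pvGetS c "observed_at" ""

-- groups.setdefault(key, []).append(c)  ==  groups[key] = groups.get(key, []) + [c]
def pvStepB (g : PySem.Dict (String × String) (List (List (String × String))))
    (c : List (String × String)) : PySem.Dict (String × String) (List (List (String × String))) :=
  g.modify (pvKey c) [] (fun xs => xs ++ [c])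

def deduplicate_claims_py_alt (claims : List (List (String × String))) : List (List (String × String)) :=
  let groups := claims.foldl pvStepB PySem.Dict.empty
  groups.values.foldl (fun result group =>
    match PySem.List.max2? group pvK1 pvK2 with
    | some w => result ++ [w]
    | none => result) []    -- none unreachable: every group is nonempty (Python max would raise)

-- ===== PRECONDITION & SPEC =====
def Spec_deduplicate_claims_py (claims : List (List (String × String))) (out : List (List (String × String))) : Prop := out = deduplicate_claims_py_alt claims
instance (claims : List (List (String × String))) (out : List (List (String × String))) : Decidable (Spec_deduplicate_claims_py claims out) := by unfold Spec_deduplicate_claims_py; infer_instance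

-- ===== CLAIM (what is proved, stated in full; the proofs are below) =====
def Claim_equal_deduplicate_claims_py : Prop := ∀ (claims : List (List (String × String))), Dom_deduplicate_claims_py claims → Spec_deduplicate_claims_py claims (deduplicate_claims_py claims)

-- ===== LEMMAS AND PROOFS =====

-- proof-side vocabulary
def pvGrp (l : List (List (String × String))) (k : String × String) : List (List (String × String)) :=
  l.filter (fun c => pvKey c == k)

def pvKeys (l : List (List (String × String))) : List (String × String) :=
  PySem.Set.ofList (l.map pvKey)

def pvPickD (g : List (List (String × String))) : List (String × String) :=
  match PySem.List.max2? g pvK1 pvK2 with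
  | some w => w
  | none => []

def pvTab (l : List (List (String × String))) : List ((String × String) × List (String × String)) :=
  (pvKeys l).map (fun k => (k, pvPickD (pvGrp l k)))

lemma pvKeys_nodup (l : List (List (String × String))) : (pvKeys l).Nodup :=
  PySem.Set.nodup_ofList _

lemma pvMem_keys (k : String × String) (l : List (List (String × String))) :
    k ∈ pvKeys l ↔ k ∈ l.map pvKey :=
  PySem.Set.mem_ofList _ _

lemma pvKeys_append (l : List (List (String × String))) (c : List (String × String)) :
    pvKeys (l ++ [c]) = PySem.Set.add (pvKeys l) (pvKey c) := by
  simp [pvKeys, PySem.Set.ofList, List.foldl_append]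

lemma pvGrp_append (l : List (List (String × String))) (c : List (String × String)) (k : String × String) :
    pvGrp (l ++ [c]) k = pvGrp l k ++ (if pvKey c == k then [c] else []) := by
  simp only [pvGrp, List.filter_append]
  by_cases h : pvKey c = k <;> simp [h]

lemma pvGrp_nil_of_not_mem (l : List (List (String × String))) (k : String × String)
    (h : k ∉ pvKeys l) : pvGrp l k = [] := by
  rw [pvMem_keys] at h
  simp only [pvGrp, List.filter_eq_nil_iff]
  intro c hc hbeq
  exact h (List.mem_map.mpr ⟨c, hc, by simpa using hbeq⟩)

lemma pvGrp_ne_nil_of_mem (l : List (List (String × String))) (k : String × String)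
    (h : k ∈ pvKeys l) : pvGrp l k ≠ [] := by
  rw [pvMem_keys] at h
  obtain ⟨c, hc, hk⟩ := List.mem_map.mp h
  simp only [pvGrp, ne_eq, List.filter_eq_nil_iff, not_forall]
  exact ⟨c, hc, by simp [hk]⟩

lemma pvMax2_ne_none (g : List (List (String × String))) (hg : g ≠ [])
    (h : PySem.List.max2? g pvK1 pvK2 = none) : False := by
  obtain ⟨x, t, rfl⟩ := List.exists_cons_of_ne_nil hg
  simp only [PySem.List.max2?, List.foldl_cons] at h
  -- foldl starting from `some x` never returns none
  clear hg
  induction t generalizing x with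
  | nil => simp at h
  | cons y t ih =>
    simp only [List.foldl_cons] at h
    by_cases hc : (decide (pvK1 x < pvK1 y) || !decide (pvK1 y < pvK1 x) && decide (pvK2 x < pvK2 y)) = true
    · rw [if_pos hc] at h; exact ih y h
    · rw [if_neg hc] at h; exact ih x h

lemma pvMax2_append (g : List (List (String × String))) (c w : List (String × String))
    (h : PySem.List.max2? g pvK1 pvK2 = some w) :
    PySem.List.max2? (g ++ [c]) pvK1 pvK2 =
      if (decide (pvK1 w < pvK1 c) || !decide (pvK1 c < pvK1 w) && decide (pvK2 w < pvK2 c)) = true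
      then some c else some w := by
  simp only [PySem.List.max2?] at h ⊢
  rw [List.foldl_append, h]
  rfl

-- A's loop state is exactly the table 'key ↦ first max of its group so far'
lemma pvA_state (l : List (List (String × String))) :
    l.foldl pvStepA PySem.Dict.empty = PySem.Dict.mk (pvTab l) := by
  induction l using List.reverseRecOn with
  | nil => rfl
  | append_singleton l c ih =>
    rw [List.foldl_append, List.foldl_cons, List.foldl_nil, ih]
    have hndk : (PySem.Dict.mk (pvTab l)).keys.Nodup := by
      have : (PySem.Dict.mk (pvTab l)).keys = pvKeys l := by
        show (pvTab l).map (fun p => p.1) = pvKeys l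
        simp only [pvTab, List.map_map]
        show List.map (fun k => k) (pvKeys l) = pvKeys l
        exact List.map_id' (pvKeys l)
      rw [this]; exact pvKeys_nodup l
    by_cases hK : pvKey c ∈ pvKeys l
    · -- key already seen
      have hcon : (PySem.Dict.mk (pvTab l)).contains (pvKey c) = true := by
        simp only [PySem.Dict.contains, pvTab, List.any_map, List.any_eq_true]
        exact ⟨pvKey c, hK, by simp⟩
      have hmem : (pvKey c, pvPickD (pvGrp l (pvKey c))) ∈ (PySem.Dict.mk (pvTab l)).items :=
        List.mem_map_of_mem hK
      have hget : (PySem.Dict.mk (pvTab l)).get? (pvKey c) = some (pvPickD (pvGrp l (pvKey c))) :=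
        PySem.Dict.get?_of_mem_items _ hmem hndk
      obtain ⟨w, hw⟩ : ∃ w, PySem.List.max2? (pvGrp l (pvKey c)) pvK1 pvK2 = some w := by
        cases hmax : PySem.List.max2? (pvGrp l (pvKey c)) pvK1 pvK2 with
        | some w => exact ⟨w, rfl⟩
        | none => exact absurd (pvMax2_ne_none _ (pvGrp_ne_nil_of_mem l _ hK) hmax) (by simp)
      have hpd : pvPickD (pvGrp l (pvKey c)) = w := by simp [pvPickD, hw]
      have hadd : PySem.Set.add (pvKeys l) (pvKey c) = pvKeys l := by
        simp [PySem.Set.add, PySem.Set.contains, hK]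
      have hins : ∀ v, (PySem.Dict.mk (pvTab l)).insert (pvKey c) v =
          PySem.Dict.mk ((pvKeys l).map (fun k => (k, if k = pvKey c then v else pvPickD (pvGrp l k)))) := by
        intro v
        apply PySem.Dict.ext
        rw [PySem.Dict.items_insert_of_contains _ _ hcon]
        show ((pvTab l).map _) = _
        simp only [pvTab, List.map_map]
        apply List.map_congr_left
        intro k _
        by_cases hkc : k = pvKey c <;> simp [hkc]
      have hrhs : pvTab (l ++ [c]) = (pvKeys l).map (fun k =>
          (k, if k = pvKey c
              then (if (decide (pvK1 w < pvK1 c) || !decide (pvK1 c < pvK1 w) && decide (pvK2 w < pvK2 c)) = true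
                    then c else w)
              else pvPickD (pvGrp l k))) := by
        rw [pvTab, pvKeys_append, hadd]
        apply List.map_congr_left
        intro k _
        rw [pvGrp_append]
        by_cases hkc : k = pvKey c
        · subst hkc
          rw [if_pos rfl, if_pos (by simp)]
          have : pvPickD (pvGrp l (pvKey c) ++ [c]) =
              if (decide (pvK1 w < pvK1 c) || !decide (pvK1 c < pvK1 w) && decide (pvK2 w < pvK2 c)) = true
              then c else w := by
            unfold pvPickD
            rw [pvMax2_append _ _ _ hw]
            by_cases hc : (decide (pvK1 w < pvK1 c) || !decide (pvK1 c < pvK1 w) && decide (pvK2 w < pvK2 c)) = true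
            · rw [if_pos hc, if_pos hc]
            · rw [if_neg hc, if_neg hc]
          rw [this]
        · rw [if_neg (by simp only [beq_iff_eq]; exact fun h => hkc h.symm), if_neg hkc, List.append_nil]
      rw [hrhs]
      show pvStepA (PySem.Dict.mk (pvTab l)) c = _
      simp only [pvStepA, hcon, Bool.true_eq_false, if_false, hget, hpd, gt_iff_lt]
      by_cases p1 : pvRank (pvGetS w "confidence" "low") < pvRank (pvGetS c "confidence" "low")
      · -- strictly better rank: A replaces, cond is true
        rw [if_pos p1, hins c]
        congr 1
        apply List.map_congr_left
        intro k _
        have hcond : (decide (pvK1 w < pvK1 c) || !decide (pvK1 c < pvK1 w) && decide (pvK2 w < pvK2 c)) = true := by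
          simp only [pvK1, pvK2]
          simp [p1]
        by_cases hkc : k = pvKey c
        · subst hkc
          rw [if_pos rfl, if_pos rfl, hcond, if_pos rfl]
        · rw [if_neg hkc, if_neg hkc]
      · rw [if_neg p1]
        by_cases p2 : pvRank (pvGetS c "confidence" "low") = pvRank (pvGetS w "confidence" "low")
        · rw [if_pos p2]
          have hc1 : ¬ pvRank (pvGetS c "confidence" "low") < pvRank (pvGetS w "confidence" "low") := by omega
          by_cases p3 : pvGetS w "observed_at" "" < pvGetS c "observed_at" ""
          · -- same rank, strictly later: A replaces, cond is true
            rw [if_pos p3, hins c]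
            congr 1
            apply List.map_congr_left
            intro k _
            have hcond : (decide (pvK1 w < pvK1 c) || !decide (pvK1 c < pvK1 w) && decide (pvK2 w < pvK2 c)) = true := by
              simp only [pvK1, pvK2]
              simp [hc1, p3]
            by_cases hkc : k = pvKey c
            · subst hkc
              rw [if_pos rfl, if_pos rfl, hcond, if_pos rfl]
            · rw [if_neg hkc, if_neg hkc]
          · -- same rank, not later: A keeps, cond is false
            rw [if_neg p3]
            congr 1
            unfold pvTab
            apply List.map_congr_left
            intro k _
            have hcond : (decide (pvK1 w < pvK1 c) || !decide (pvK1 c < pvK1 w) && decide (pvK2 w < pvK2 c)) = false := by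
              simp only [pvK1, pvK2]
              simp [p1, p3]
            by_cases hkc : k = pvKey c
            · subst hkc
              rw [if_pos rfl, hcond, if_neg (by simp), hpd]
            · rw [if_neg hkc]
        · -- strictly worse rank: A keeps, cond is false
          rw [if_neg p2]
          have hc1 : pvRank (pvGetS c "confidence" "low") < pvRank (pvGetS w "confidence" "low") := by omega
          congr 1
          unfold pvTab
          apply List.map_congr_left
          intro k _
          have hcond : (decide (pvK1 w < pvK1 c) || !decide (pvK1 c < pvK1 w) && decide (pvK2 w < pvK2 c)) = false := by
            simp only [pvK1, pvK2]
            simp [p1, hc1]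
          by_cases hkc : k = pvKey c
          · subst hkc
            rw [if_pos rfl, hcond, if_neg (by simp), hpd]
          · rw [if_neg hkc]
    · -- fresh key
      have hcon : (PySem.Dict.mk (pvTab l)).contains (pvKey c) = false := by
        simp only [PySem.Dict.contains, pvTab, List.any_map, List.any_eq_false]
        intro k hk
        simpa using fun (hkc : k = pvKey c) => hK (hkc ▸ hk)
      have hadd : PySem.Set.add (pvKeys l) (pvKey c) = pvKeys l ++ [pvKey c] := by
        simp [PySem.Set.add, PySem.Set.contains, hK]
      show pvStepA (PySem.Dict.mk (pvTab l)) c = _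
      simp only [pvStepA, hcon]
      rw [if_pos trivial]
      apply PySem.Dict.ext
      rw [PySem.Dict.items_insert_of_not_contains _ _ hcon]
      show (pvTab l) ++ [(pvKey c, c)] = pvTab (l ++ [c])
      conv_rhs => rw [pvTab, pvKeys_append, hadd, List.map_append]
      congr 1
      · unfold pvTab
        apply List.map_congr_left
        intro k hk
        rw [pvGrp_append, if_neg (by simp; intro h; exact hK (h ▸ hk)), List.append_nil]
      · simp only [List.map_cons, List.map_nil]
        rw [pvGrp_append, pvGrp_nil_of_not_mem l _ hK, if_pos (by simp), List.nil_append]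
        rfl

-- B's groups dict is exactly 'key ↦ its group'
lemma pvB_groups (l : List (List (String × String))) :
    (l.foldl pvStepB PySem.Dict.empty).items = (pvKeys l).map (fun k => (k, pvGrp l k)) := by
  have hnd : (l.foldl pvStepB PySem.Dict.empty).keys.Nodup :=
    PySem.Dict.nodup_keys_foldl_modify_key l pvKey []
      (fun _ c xs => xs ++ [c]) PySem.Dict.empty PySem.Dict.nodup_keys_empty
  have hkeys : (l.foldl pvStepB PySem.Dict.empty).keys = pvKeys l := by
    have h := PySem.Dict.keys_foldl_modify_key l pvKey []
      (fun _ c xs => xs ++ [c]) (PySem.Dict.empty (κ := String × String) (ν := List (List (String × String))))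
    exact h
  have hgetD : ∀ k, (l.foldl pvStepB PySem.Dict.empty).getD k [] = pvGrp l k := by
    intro k
    have h := PySem.Dict.getD_foldl_modify_append (l.map (fun c => (pvKey c, c)))
      (PySem.Dict.empty (κ := String × String) (ν := List (List (String × String)))) k
    rw [List.foldl_map] at h
    have h2 : (l.foldl pvStepB PySem.Dict.empty).getD k [] =
        PySem.Dict.empty.getD k [] ++
          ((l.map (fun c => (pvKey c, c))).filter (fun p => p.1 == k)).map (fun x => x.2) := h
    rw [h2, List.filter_map, List.map_map]
    simp only [PySem.Dict.getD_empty, List.nil_append]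
    show List.map (fun c => c) (List.filter (fun c => pvKey c == k) l) = pvGrp l k
    simp [pvGrp]
  rw [PySem.Dict.items_eq_map_keys _ hnd [], hkeys]
  exact List.map_congr_left (fun k _ => by rw [hgetD k])

lemma pvPickFold (gs : List (List (List (String × String)))) (acc : List (List (String × String)))
    (h : ∀ g ∈ gs, g ≠ []) :
    gs.foldl (fun result group =>
      match PySem.List.max2? group pvK1 pvK2 with
      | some w => result ++ [w]
      | none => result) acc = acc ++ gs.map pvPickD := by
  induction gs generalizing acc with
  | nil => simp
  | cons g gs ih =>
    obtain ⟨w, hw⟩ : ∃ w, PySem.List.max2? g pvK1 pvK2 = some w := by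
      have hg : g ≠ [] := h g (by simp)
      cases hmax : PySem.List.max2? g pvK1 pvK2 with
      | some w => exact ⟨w, rfl⟩
      | none => exact absurd (pvMax2_ne_none g hg hmax) (by simp)
    simp only [List.foldl_cons, hw, List.map_cons]
    rw [ih _ (fun g hg => h g (by simp [hg]))]
    simp [pvPickD, hw]

-- ===== VERDICT (by name: the statement is the Claim_ definition above) =====
theorem deduplicate_claims_py_spec : Claim_equal_deduplicate_claims_py := by
  intro claims _
  unfold Spec_deduplicate_claims_py deduplicate_claims_py deduplicate_claims_py_alt
  rw [pvA_state]
  have hvals : (PySem.Dict.mk (pvTab claims)).values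
      = (pvKeys claims).map (fun k => pvPickD (pvGrp claims k)) := by
    show (pvTab claims).map (fun p => p.2) = _
    simp only [pvTab, List.map_map]
    rfl
  have hgv : (claims.foldl pvStepB PySem.Dict.empty).values
      = (pvKeys claims).map (fun k => pvGrp claims k) := by
    show (claims.foldl pvStepB PySem.Dict.empty).items.map (fun p => p.2) = _
    rw [pvB_groups]
    simp only [List.map_map]
    rfl
  rw [hvals]
  show _ = List.foldl (fun result group =>
      match PySem.List.max2? group pvK1 pvK2 with
      | some w => result ++ [w]
      | none => result) [] (claims.foldl pvStepB PySem.Dict.empty).values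
  rw [hgv, pvPickFold _ _ (by
    intro g hg
    obtain ⟨k, hk, rfl⟩ := List.mem_map.mp hg
    exact pvGrp_ne_nil_of_mem claims k hk)]
  simp [List.map_map]
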